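-- pv_equiv track=rewrite | github.com/Go-Allan/SmallProjects-Miscellaneous | PycharmProjects/KivyAppLearning/venv/Lib/site-packages/kivygui/keybinder.py | _hash_key
-- ===== SOURCE A (Python) =====
-- from contextlib import suppress
--
-- def _hash_key(hotkey):
--     # Order doesn't matter for modifiers, so we force an order here
--     # control - shift - alt - win, and when we read back the modifers we spit them
--     # out in the same value so our dictionary keys always match
--     new_hotkey = []
--     if len(hotkey) < 3:
--         new_hotkey = [x for x in hotkey]
--     else:
--         # TODO these modifiers strings are wrong...
--         for mod in hotkey[:-1]:
--             if 'control' == mod: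
--                 new_hotkey.append(mod)
--         for mod in hotkey[:-1]:
--             if 'shift' == mod:
--                 new_hotkey.append(mod)
--         for mod in hotkey[:-1]:
--             if 'alt' == mod:
--                 new_hotkey.append(mod)
--         for mod in hotkey[:-1]:
--             if 'super' == mod:
--                 new_hotkey.append(mod)
--         new_hotkey.append(hotkey[-1])
--     # Ensure consistent format for ints
--     with suppress(ValueError):
--         new_hotkey[-1] = int(hotkey[-1])
--     return tuple(new_hotkey)
-- ===== SOURCE B (Python) =====
-- _PRIO = {'control': 0, 'shift': 1, 'alt': 2, 'super': 3}
--
-- def _hash_key(hotkey):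
--     if len(hotkey) < 3:
--         new_hotkey = list(hotkey)
--     else:
--         # one stable sort by canonical priority; unknown modifier strings are dropped
--         new_hotkey = sorted((m for m in hotkey[:-1] if m in _PRIO), key=_PRIO.__getitem__)
--         new_hotkey.append(hotkey[-1])
--     try:
--         new_hotkey[-1] = int(hotkey[-1])
--     except ValueError:
--         pass
--     return tuple(new_hotkey)
-- ===== Notes on version B (the rewrite author's own statement) =====
-- stated objective: simpler
-- what changed: Replaces the four separate scans of hotkey[:-1] (one per modifier name) by a single filter of the known modifiers plus one stable sort under a priority map.
import Mathlib
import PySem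

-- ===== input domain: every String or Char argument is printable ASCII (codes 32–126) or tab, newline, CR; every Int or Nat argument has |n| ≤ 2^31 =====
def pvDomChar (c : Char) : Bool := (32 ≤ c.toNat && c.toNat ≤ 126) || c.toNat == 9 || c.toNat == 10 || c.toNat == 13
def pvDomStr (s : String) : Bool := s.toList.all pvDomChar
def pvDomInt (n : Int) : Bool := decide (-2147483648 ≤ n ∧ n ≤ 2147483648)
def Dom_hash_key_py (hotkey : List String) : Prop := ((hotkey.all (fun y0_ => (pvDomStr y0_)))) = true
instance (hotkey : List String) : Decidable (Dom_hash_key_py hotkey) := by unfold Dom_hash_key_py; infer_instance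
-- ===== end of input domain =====

-- B replaces A's four separate scans of hotkey[:-1] by one filter + one stable sort
-- under a priority map (objective: simpler). Equivalence is about the return value.

-- ===== PORT A =====
-- Under Pre_ the final 'new_hotkey[-1] = int(hotkey[-1])' of A is a no-op: int()
-- raises ValueError there (suppressed), since Pre_ demands a non-int-parsable last
-- element; Pre_ also demands hotkey ≠ [], so new_hotkey[-1] raises no IndexError.
def hash_key_py (hotkey : List String) : List String :=
  if hotkey.length < 3 then hotkey   -- new_hotkey = [x for x in hotkey]
  else
    let pre := PySem.List.slice hotkey none (some (-1))   -- hotkey[:-1]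
    let nh1 := pre.foldl (fun acc m => if "control" == m then acc ++ [m] else acc) []
    let nh2 := pre.foldl (fun acc m => if "shift" == m then acc ++ [m] else acc) nh1
    let nh3 := pre.foldl (fun acc m => if "alt" == m then acc ++ [m] else acc) nh2
    let nh4 := pre.foldl (fun acc m => if "super" == m then acc ++ [m] else acc) nh3
    nh4 ++ [(PySem.List.pyGet? hotkey (-1)).getD ""]      -- append hotkey[-1]

-- ===== PORT B =====
-- the priority dict _PRIO of Source B, as a lookup function ('m in _PRIO' = isSome)
def pvPrio? (m : String) : Option Nat :=
  if m = "control" then some 0 else if m = "shift" then some 1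
  else if m = "alt" then some 2 else if m = "super" then some 3 else none

def hash_key_py_alt (hotkey : List String) : List String :=
  if hotkey.length < 3 then hotkey
  else
    let mods := (PySem.List.slice hotkey none (some (-1))).filter (fun m => (pvPrio? m).isSome)
    PySem.List.sorted mods (fun m => (pvPrio? m).getD 4) false
      ++ [(PySem.List.pyGet? hotkey (-1)).getD ""]

-- ===== PRECONDITION & SPEC =====
-- Pre_ excludes the empty list, on which A (and B) raise IndexError, and lists whose
-- last element parses as a Python int, on which A's tuple ends in an int — not a
-- value of the declared List String type (B returns the same tuple there).
def Pre_hash_key_py (hotkey : List String) : Prop :=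
  hotkey ≠ [] ∧ PySem.Int.ofStr? ((PySem.List.pyGet? hotkey (-1)).getD "") = none
instance (hotkey : List String) : Decidable (Pre_hash_key_py hotkey) := by
  unfold Pre_hash_key_py; infer_instance

def pvWitness_hash_key_py : List String := ["shift", "control", "a"]

def Spec_hash_key_py (hotkey : List String) (out : List String) : Prop := out = hash_key_py_alt hotkey
instance (hotkey : List String) (out : List String) : Decidable (Spec_hash_key_py hotkey out) := by unfold Spec_hash_key_py; infer_instance

-- ===== CLAIM (what is proved, stated in full; the proofs are below) =====
def Claim_equal_hash_key_py : Prop := ∀ (hotkey : List String), Dom_hash_key_py hotkey → Pre_hash_key_py hotkey → Spec_hash_key_py hotkey (hash_key_py hotkey)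

-- ===== LEMMAS AND PROOFS =====

-- the order by which B's stable sort is identified: strictly smaller priority, or equal
def pvR (a b : String) : Prop := (pvPrio? a).getD 4 < (pvPrio? b).getD 4 ∨ a = b

lemma pvPrio?_inj (a b : String) (ha : (pvPrio? a).isSome = true) (hb : (pvPrio? b).isSome = true)
    (h : (pvPrio? a).getD 4 = (pvPrio? b).getD 4) : a = b := by
  unfold pvPrio? at *
  split_ifs at * <;> simp_all

lemma mem_filter_beq (l : List String) (s x : String)
    (hx : x ∈ l.filter (fun m => s == m)) : x = s := by
  have := List.of_mem_filter hx
  simp only [beq_iff_eq] at this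
  exact this.symm

-- a count of a filtered list, as an if on the filter's test at the counted element
lemma count_filter_if (p : String → Bool) (a : String) (l : List String) :
    List.count a (l.filter p) = if p a then List.count a l else 0 := by
  by_cases h : p a
  · simp [List.count_filter h, h]
  · simp only [h, if_false]
    exact List.count_eq_zero.mpr (fun hm => h (List.of_mem_filter hm))

-- the concatenation of A's four value-filters is a permutation of B's priority filter
lemma perm_filters (l : List String) :
    (l.filter (fun m => (pvPrio? m).isSome)).Perm
      (l.filter (fun m => "control" == m) ++ l.filter (fun m => "shift" == m)
        ++ l.filter (fun m => "alt" == m) ++ l.filter (fun m => "super" == m)) := by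
  refine List.perm_iff_count.mpr (fun a => ?_)
  simp only [List.count_append, count_filter_if]
  by_cases h0 : a = "control"
  · simp [h0, pvPrio?]
  · by_cases h1 : a = "shift"
    · simp [h1, pvPrio?]
    · by_cases h2 : a = "alt"
      · simp [h2, pvPrio?]
      · by_cases h3 : a = "super"
        · simp [h3, pvPrio?]
        · simp [pvPrio?, h0, h1, h2, h3, Ne.symm h0, Ne.symm h1, Ne.symm h2, Ne.symm h3]

-- each single-value filter is pairwise under pvR (all its members are equal)
lemma pw_group (l : List String) (s : String) :
    (l.filter (fun m => s == m)).Pairwise pvR := by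
  refine List.pairwise_of_forall_mem_list (fun a ha b hb => ?_)
  exact Or.inr ((mem_filter_beq l s a ha).trans (mem_filter_beq l s b hb).symm)

-- cross-group order: every member of filter s₁ is pvR-below every member of filter s₂
lemma pw_cross (l : List String) (s₁ s₂ : String)
    (h : (pvPrio? s₁).getD 4 < (pvPrio? s₂).getD 4) :
    ∀ a ∈ l.filter (fun m => s₁ == m), ∀ b ∈ l.filter (fun m => s₂ == m), pvR a b := by
  intro a ha b hb
  rw [mem_filter_beq l s₁ a ha, mem_filter_beq l s₂ b hb]
  exact Or.inl h

-- B's single stable sort produces exactly A's concatenation of the four filters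
lemma sorted_eq_concat (l : List String) :
    PySem.List.sorted (l.filter (fun m => (pvPrio? m).isSome)) (fun m => (pvPrio? m).getD 4) false
      = l.filter (fun m => "control" == m) ++ l.filter (fun m => "shift" == m)
        ++ l.filter (fun m => "alt" == m) ++ l.filter (fun m => "super" == m) := by
  have hperm : (PySem.List.sorted (l.filter (fun m => (pvPrio? m).isSome))
      (fun m => (pvPrio? m).getD 4) false).Perm
      (l.filter (fun m => "control" == m) ++ l.filter (fun m => "shift" == m)
        ++ l.filter (fun m => "alt" == m) ++ l.filter (fun m => "super" == m)) :=
    (PySem.List.sorted_perm _ _ _).trans (perm_filters l)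
  have hp1 : (PySem.List.sorted (l.filter (fun m => (pvPrio? m).isSome))
      (fun m => (pvPrio? m).getD 4) false).Pairwise pvR := by
    refine (PySem.List.sorted_pairwise (xs := l.filter (fun m => (pvPrio? m).isSome))
      (key := fun m => (pvPrio? m).getD 4)).imp_of_mem ?_
    intro a b ha hb hle
    have ha' := List.of_mem_filter ((PySem.List.mem_sorted _ _ _ _).mp ha)
    have hb' := List.of_mem_filter ((PySem.List.mem_sorted _ _ _ _).mp hb)
    rcases lt_or_eq_of_le hle with h | h
    · exact Or.inl h
    · exact Or.inr (pvPrio?_inj a b ha' hb' h)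
  have hp2 : (l.filter (fun m => "control" == m) ++ l.filter (fun m => "shift" == m)
      ++ l.filter (fun m => "alt" == m) ++ l.filter (fun m => "super" == m)).Pairwise pvR := by
    refine List.pairwise_append.mpr ⟨List.pairwise_append.mpr ⟨List.pairwise_append.mpr
      ⟨pw_group l "control", pw_group l "shift", pw_cross l "control" "shift" (by decide)⟩,
      pw_group l "alt", ?_⟩, pw_group l "super", ?_⟩
    · intro a ha b hb
      rcases List.mem_append.mp ha with h | h
      · exact pw_cross l "control" "alt" (by decide) a h b hb
      · exact pw_cross l "shift" "alt" (by decide) a h b hb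
    · intro a ha b hb
      rcases List.mem_append.mp ha with h | h
      · rcases List.mem_append.mp h with h' | h'
        · exact pw_cross l "control" "super" (by decide) a h' b hb
        · exact pw_cross l "shift" "super" (by decide) a h' b hb
      · exact pw_cross l "alt" "super" (by decide) a h b hb
  refine hperm.eq_of_pairwise ?_ hp1 hp2
  intro a b _ _ hab hba
  rcases hab with h | h
  · rcases hba with h' | h'
    · exact absurd h' (Nat.lt_asymm h)
    · exact h'.symm
  · exact h

-- ===== VERDICT (by name: the statement is the Claim_ definition above) =====
theorem hash_key_py_spec : Claim_equal_hash_key_py := by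
  intro hotkey _ _
  unfold Spec_hash_key_py hash_key_py hash_key_py_alt
  by_cases hlen : hotkey.length < 3
  · simp [hlen]
  · simp only [hlen, if_false]
    rw [PySem.List.foldl_append_if_eq_filter, PySem.List.foldl_append_if_eq_filter,
        PySem.List.foldl_append_if_eq_filter, PySem.List.foldl_append_if_eq_filter,
        sorted_eq_concat]
    simp [List.append_assoc]
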